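-- pv_equiv track=rewrite | github.com/lappazos/Intro_Ex_5_Crossword | crossword.py | ne_sw_diagonal
-- ===== SOURCE A (Python) =====
-- def ne_sw_diagonal(mat_new):
--     """create a new mat from the original - turns every
--     north-east/south-west diagonal into a list by order"""
--     length = len(mat_new)
--     length_row = len(mat_new[0])
--     ne_sw_mat = []
--     counter = 0
--     for i in range(length + length_row - 1):
--         temp = []
--         # the if will help us when the diagonals reach their final
--         # phase - while i is out of range, it will stay permanent and
--         # counter takes action
--         if i > length - 1:
--             i = length - 1
--             counter += 1
--         for j in range(min(i + 1, length_row)):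
--             # j takes the min range because we want it to grow together with
--             #  i but only until the max lenth of the row
--             c = j + counter
--             # c will be equal to j mostly, it will change only when counter
--             # takes action, and help us 'skip' un-wanted items
--             if c > length_row - 1:
--                 # this prevents us from getting out of range
--                 break
--             temp.append(mat_new[i - j][c])
--             # every time the row index grows according to j loop
--         ne_sw_mat.append(temp)
--     return ne_sw_mat
-- ===== SOURCE B (Python) =====
-- def ne_sw_diagonal(mat_new):
--     """create a new mat from the original - turns every
--     north-east/south-west diagonal into a list by order"""
--     length = len(mat_new)
--     length_row = len(mat_new[0])
--     buckets = [[] for _ in range(length + length_row - 1)]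
--     for col in range(length_row):
--         for row in range(length):
--             buckets[row + col].append(mat_new[row][col])
--     return buckets
-- ===== Notes on version B (the rewrite author's own statement) =====
-- stated objective: simpler
-- what changed: Replaces A's per-diagonal gather with its clamped index, counter and break logic by one flat column-major pass that scatters each cell mat_new[row][col] into bucket row+col of a pre-allocated bucket list.
import Mathlib
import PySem

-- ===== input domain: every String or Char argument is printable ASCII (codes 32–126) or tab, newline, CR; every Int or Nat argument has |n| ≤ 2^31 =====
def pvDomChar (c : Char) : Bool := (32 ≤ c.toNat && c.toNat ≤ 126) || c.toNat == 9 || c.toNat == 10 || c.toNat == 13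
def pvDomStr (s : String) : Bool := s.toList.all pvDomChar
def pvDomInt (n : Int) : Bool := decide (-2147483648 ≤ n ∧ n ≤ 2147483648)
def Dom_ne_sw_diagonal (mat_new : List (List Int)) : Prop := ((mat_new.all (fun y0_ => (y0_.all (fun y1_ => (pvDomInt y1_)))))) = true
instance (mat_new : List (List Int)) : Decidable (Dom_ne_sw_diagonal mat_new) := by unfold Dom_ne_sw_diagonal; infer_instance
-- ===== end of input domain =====

-- B replaces A's per-diagonal gather (clamped index + counter + break) by one flat
-- column-major scatter into pre-allocated buckets keyed by row+col (objective: simpler).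

-- ===== PORT A =====
-- inner 'for j in range(min(i+1, length_row))' loop with its break, returning temp
def pvAInner (mat_new : List (List Int)) (length_row i counter : Int) : List Int :=
  ((PySem.List.pyRange 0 (min (i + 1) length_row) 1).foldl
      (fun (tb : List Int × Bool) j =>
        if tb.2 = true then tb
        else if j + counter > length_row - 1 then (tb.1, true)
        else (tb.1 ++ [PySem.List.pyGetD (PySem.List.pyGetD mat_new (i - j) []) (j + counter) 0], tb.2))
      ([], false)).1

-- one iteration of the outer 'for i in range(length + length_row - 1)' loop
def pvAStep (mat_new : List (List Int)) (length length_row : Int)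
    (st : List (List Int) × Int) (i0 : Int) : List (List Int) × Int :=
  if i0 > length - 1 then
    (st.1 ++ [pvAInner mat_new length_row (length - 1) (st.2 + 1)], st.2 + 1)
  else
    (st.1 ++ [pvAInner mat_new length_row i0 st.2], st.2)

def ne_sw_diagonal (mat_new : List (List Int)) : List (List Int) :=
  ((PySem.List.pyRange 0 ((mat_new.length : Int) + ((PySem.List.pyGetD mat_new 0 []).length : Int) - 1) 1).foldl
    (pvAStep mat_new (mat_new.length : Int) ((PySem.List.pyGetD mat_new 0 []).length : Int))
    ([], 0)).1

-- ===== PORT B =====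
-- inner 'for row in range(length)' loop: scatter column col into the buckets
def pvBInner (mat_new : List (List Int)) (length col : Int) (bs : List (List Int)) : List (List Int) :=
  (PySem.List.pyRange 0 length 1).foldl
    (fun bs row =>
      PySem.List.pySetD bs (row + col)
        (PySem.List.pyGetD bs (row + col) [] ++
          [PySem.List.pyGetD (PySem.List.pyGetD mat_new row []) col 0]))
    bs

def ne_sw_diagonal_alt (mat_new : List (List Int)) : List (List Int) :=
  (PySem.List.pyRange 0 ((PySem.List.pyGetD mat_new 0 []).length : Int) 1).foldl
    (fun bs col => pvBInner mat_new (mat_new.length : Int) col bs)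
    (List.replicate ((mat_new.length : Int) + ((PySem.List.pyGetD mat_new 0 []).length : Int) - 1).toNat [])

-- ===== PRECONDITION & SPEC =====
-- Pre_ excludes exactly the inputs where Python A raises an IndexError: the empty
-- matrix (mat_new[0] raises) and matrices with a row shorter than row 0.
def Pre_ne_sw_diagonal (mat_new : List (List Int)) : Prop :=
  mat_new ≠ [] ∧ ∀ row ∈ mat_new, (PySem.List.pyGetD mat_new 0 []).length ≤ row.length
instance (mat_new : List (List Int)) : Decidable (Pre_ne_sw_diagonal mat_new) := by
  unfold Pre_ne_sw_diagonal; infer_instance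
def pvWitness_ne_sw_diagonal : List (List Int) := [[1, 2], [3, 4]]

def Spec_ne_sw_diagonal (mat_new : List (List Int)) (out : List (List Int)) : Prop :=
  out = ne_sw_diagonal_alt mat_new
instance (mat_new : List (List Int)) (out : List (List Int)) : Decidable (Spec_ne_sw_diagonal mat_new out) := by
  unfold Spec_ne_sw_diagonal; infer_instance

-- ===== CLAIM (what is proved, stated in full; the proofs are below) =====
def Claim_equal_ne_sw_diagonal : Prop := ∀ (mat_new : List (List Int)), Dom_ne_sw_diagonal mat_new → Pre_ne_sw_diagonal mat_new → Spec_ne_sw_diagonal mat_new (ne_sw_diagonal mat_new)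

-- ===== LEMMAS AND PROOFS =====

-- the cell mat[r][c] as both ports read it (out-of-range reads default, excluded by Pre_)
def pvGetM (mat : List (List Int)) (r c : Nat) : Int := (mat.getD r []).getD c 0

-- the NE-SW diagonal d of mat: cells (d-c, c) for increasing column c
def pvDiag (mat : List (List Int)) (d : Nat) : List Int :=
  (List.range (PySem.List.pyGetD mat 0 []).length).filterMap
    (fun c => if c ≤ d ∧ d < mat.length + c then some (pvGetM mat (d - c) c) else none)

-- a filterMap over range n with an interval condition is a map over the shifted interval
theorem pv_filterMap_interval (g : Nat → Int) (cond : Nat → Prop) [DecidablePred cond]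
    (c0 e : Nat) :
    ∀ n, (∀ c, c < n → (cond c ↔ (c0 ≤ c ∧ c < e))) →
    (List.range n).filterMap (fun c => if cond c then some (g c) else none)
      = (List.range (min n e - c0)).map (fun t => g (c0 + t)) := by
  intro n
  induction n with
  | zero => intro _; simp
  | succ n ih =>
    intro h
    rw [List.range_succ, List.filterMap_append, ih (fun c hc => h c (by omega))]
    by_cases hcond : cond n
    · have hn := (h n (by omega)).mp hcond
      have h1 : min (n + 1) e - c0 = (min n e - c0) + 1 := by omega
      have h2 : c0 + (min n e - c0) = n := by omega
      rw [h1, List.range_succ, List.map_append]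
      simp [hcond, h2]
    · have hn : ¬ (c0 ≤ n ∧ n < e) := fun hc => hcond ((h n (by omega)).mpr hc)
      have h1 : min (n + 1) e - c0 = min n e - c0 := by omega
      rw [h1]
      simp [hcond]

-- a left-to-right fold with a monotone break threshold t is a map over range (min n t)
theorem pv_breakFold (f : Nat → Int) (t : Nat) :
    ∀ n : Nat,
    (List.range n).foldl
        (fun (tb : List Int × Bool) j =>
          if tb.2 = true then tb
          else if t ≤ j then (tb.1, true)
          else (tb.1 ++ [f j], tb.2))
        ([], false)
      = ((List.range (min n t)).map f, decide (t < n)) := by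
  intro n
  induction n with
  | zero => simp
  | succ n ih =>
    rw [List.range_succ, List.foldl_append, ih]
    simp only [List.foldl_cons, List.foldl_nil]
    by_cases h1 : t < n
    · have h2 : t ≤ n := by omega
      have : min (n + 1) t = min n t := by omega
      rw [this]
      simp [h1, h2, show t < n + 1 by omega]
    · by_cases h2 : t ≤ n
      · have ht : t = n := by omega
        simp only [decide_eq_true_eq, h1, if_pos h2]
        have : min (n + 1) t = min n t := by omega
        rw [this]
        simp [ht]
      · simp only [decide_eq_true_eq, h1, if_neg h2]
        have h3 : min (n + 1) t = min n t + 1 := by omega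
        have h4 : min n t = n := by omega
        rw [h3, h4, List.range_succ, List.map_append]
        simp [show ¬ t < n + 1 by omega]

-- A's inner loop computes diagonal d, early phase (d < length)
theorem pvAInner_eq_low (mat : List (List Int)) (d : Nat) (hd : d < mat.length) :
    pvAInner mat ((PySem.List.pyGetD mat 0 []).length : Int) (d : Int) 0 = pvDiag mat d := by
  set L := mat.length with hL
  set R := (PySem.List.pyGetD mat 0 []).length with hR
  unfold pvAInner
  rw [show min ((d : Int) + 1) (R : Int) = ((min (d + 1) R : Nat) : Int) by omega,
    PySem.List.pyRange_zero_natCast, List.foldl_map]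
  rw [PySem.List.foldl_congr_mem _ _
    (fun (tb : List Int × Bool) (j : Nat) =>
      if tb.2 = true then tb
      else if R ≤ j then (tb.1, true)
      else (tb.1 ++ [pvGetM mat (d - j) j], tb.2)) _
    (by
      intro acc k hk
      have hk' : k ≤ d ∧ k < R := by
        simp only [List.mem_range] at hk; omega
      by_cases hb : acc.2 = true
      · simp [hb]
      · simp only [hb]
        rw [if_neg (by omega : ¬ ((k : Int) + 0 > (R : Int) - 1)),
          if_neg (by omega : ¬ (R ≤ k))]
        rw [show (d : Int) - (k : Int) = ((d - k : Nat) : Int) by omega,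
          show (k : Int) + 0 = ((k : Nat) : Int) by ring]
        simp only [PySem.List.pyGetD_natCast, pvGetM])]
  rw [pv_breakFold]
  unfold pvDiag
  rw [pv_filterMap_interval (fun c => pvGetM mat (d - c) c)
        (fun c => c ≤ d ∧ d < L + c) 0 (min (d + 1) R) R
        (by intro c hc; constructor <;> (intro hc2; omega))]
  simp only [Nat.zero_add, Nat.sub_zero]
  congr 2
  omega

-- A's inner loop computes diagonal d, late phase (length ≤ d)
theorem pvAInner_eq_high (mat : List (List Int)) (d : Nat) (hd : mat.length ≤ d) :
    pvAInner mat ((PySem.List.pyGetD mat 0 []).length : Int) ((mat.length : Int) - 1)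
        ((d : Int) - (mat.length : Int) + 1) = pvDiag mat d := by
  by_cases h0 : mat = []
  · subst h0
    unfold pvAInner pvDiag
    rw [show min (((([] : List (List Int)).length : Int)) - 1 + 1)
          ((PySem.List.pyGetD ([] : List (List Int)) 0 []).length : Int) = 0 by
        simp [PySem.List.pyGetD]]
    rw [show PySem.List.pyRange 0 0 1 = [] from PySem.List.pyRange_one_eq_nil (by omega)]
    simp [PySem.List.pyGetD]
  · have hL1 : 1 ≤ mat.length := by
      cases mat with
      | nil => exact absurd rfl h0
      | cons a l => simp
    set L := mat.length with hL
    set R := (PySem.List.pyGetD mat 0 []).length with hR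
    set c0 := d - L + 1 with hc0
    unfold pvAInner
    rw [show (d : Int) - (L : Int) + 1 = ((c0 : Nat) : Int) by omega]
    rw [show min ((L : Int) - 1 + 1) (R : Int) = ((min L R : Nat) : Int) by omega,
      PySem.List.pyRange_zero_natCast, List.foldl_map]
    rw [PySem.List.foldl_congr_mem _ _
      (fun (tb : List Int × Bool) (j : Nat) =>
        if tb.2 = true then tb
        else if R - c0 ≤ j then (tb.1, true)
        else (tb.1 ++ [pvGetM mat (L - 1 - j) (j + c0)], tb.2)) _
      (by
        intro acc k hk
        have hk' : k < L ∧ k < R := by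
          simp only [List.mem_range] at hk; omega
        by_cases hb : acc.2 = true
        · simp [hb]
        · simp only [hb]
          by_cases hbr : R - c0 ≤ k
          · rw [if_pos (by omega : (k : Int) + (c0 : Int) > (R : Int) - 1), if_pos hbr]
          · rw [if_neg (by omega : ¬ ((k : Int) + (c0 : Int) > (R : Int) - 1)), if_neg hbr]
            rw [show (L : Int) - 1 - (k : Int) = ((L - 1 - k : Nat) : Int) by omega,
              show (k : Int) + (c0 : Int) = ((k + c0 : Nat) : Int) by push_cast; ring]
            simp only [PySem.List.pyGetD_natCast, pvGetM])]
    rw [pv_breakFold]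
    unfold pvDiag
    rw [pv_filterMap_interval (fun c => pvGetM mat (d - c) c)
          (fun c => c ≤ d ∧ d < L + c) c0 (min (d + 1) R) R
          (by intro c hc; constructor <;> (intro hc2; omega))]
    rw [show min R (min (d + 1) R) - c0 = min (min L R) (R - c0) by omega]
    refine List.map_congr_left ?_
    intro t ht
    have ht' : t < L := by
      simp only [List.mem_range] at ht; omega
    have h1 : L - 1 - t = d - (c0 + t) := by omega
    have h2 : t + c0 = c0 + t := by omega
    rw [h1, h2]

-- A's outer loop invariant
theorem pvA_outer (mat : List (List Int)) :
    ∀ k : Nat,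
    ((List.range k).map (fun (n : Nat) => (n : Int))).foldl
        (pvAStep mat (mat.length : Int) ((PySem.List.pyGetD mat 0 []).length : Int)) ([], 0)
      = ((List.range k).map (pvDiag mat),
         (k : Int) - min (k : Int) (mat.length : Int)) := by
  set L := mat.length with hL
  intro k
  induction k with
  | zero =>
    simp only [List.range_zero, List.map_nil, List.foldl_nil]
    rw [show ((0 : Nat) : Int) - min ((0 : Nat) : Int) (L : Int) = 0 by omega]
  | succ k ih =>
    rw [List.range_succ, List.map_append, List.foldl_append, ih]
    simp only [List.map_cons, List.map_nil, List.foldl_cons, List.foldl_nil]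
    unfold pvAStep
    by_cases hk : k < L
    · rw [if_neg (by omega : ¬ ((k : Int) > (L : Int) - 1))]
      simp only
      rw [show (k : Int) - min (k : Int) (L : Int) = 0 by omega]
      rw [pvAInner_eq_low mat k (by omega), List.map_append,
        show ((k + 1 : Nat) : Int) - min ((k + 1 : Nat) : Int) (L : Int) = 0 by omega]
      simp
    · rw [if_pos (by omega : (k : Int) > (L : Int) - 1)]
      simp only
      rw [show (k : Int) - min (k : Int) (L : Int) + 1 = (k : Int) - (L : Int) + 1 by omega]
      rw [pvAInner_eq_high mat k (by omega), List.map_append,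
        show ((k + 1 : Nat) : Int) - min ((k + 1 : Nat) : Int) (L : Int)
            = (k : Int) - (L : Int) + 1 by omega]
      simp

-- B's inner loop invariant (one column c scattered over rows 0..k-1)
theorem pvB_inner (mat : List (List Int)) (c : Nat) :
    ∀ (k : Nat) (bs : List (List Int)), k + c ≤ bs.length →
    ((List.range k).foldl
        (fun (bs : List (List Int)) (row : Nat) =>
          PySem.List.pySetD bs ((row : Int) + (c : Int))
            (PySem.List.pyGetD bs ((row : Int) + (c : Int)) [] ++
              [PySem.List.pyGetD (PySem.List.pyGetD mat (row : Int) []) (c : Int) 0]))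
        bs).length = bs.length ∧
    ∀ d : Nat,
      ((List.range k).foldl
        (fun (bs : List (List Int)) (row : Nat) =>
          PySem.List.pySetD bs ((row : Int) + (c : Int))
            (PySem.List.pyGetD bs ((row : Int) + (c : Int)) [] ++
              [PySem.List.pyGetD (PySem.List.pyGetD mat (row : Int) []) (c : Int) 0]))
        bs).getD d []
        = bs.getD d [] ++ (if c ≤ d ∧ d < k + c then [pvGetM mat (d - c) c] else []) := by
  intro k
  induction k with
  | zero =>
    intro bs _
    refine ⟨by simp, ?_⟩
    intro d
    simp only [List.range_zero, List.foldl_nil]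
    rw [if_neg (by omega : ¬ (c ≤ d ∧ d < 0 + c))]
    simp
  | succ k ih =>
    intro bs hlen
    obtain ⟨ihlen, ihget⟩ := ih bs (by omega)
    rw [List.range_succ, List.foldl_append]
    set S := ((List.range k).foldl
        (fun (bs : List (List Int)) (row : Nat) =>
          PySem.List.pySetD bs ((row : Int) + (c : Int))
            (PySem.List.pyGetD bs ((row : Int) + (c : Int)) [] ++
              [PySem.List.pyGetD (PySem.List.pyGetD mat (row : Int) []) (c : Int) 0]))
        bs) with hS
    simp only [List.foldl_cons, List.foldl_nil]
    rw [show (k : Int) + (c : Int) = ((k + c : Nat) : Int) by push_cast; ring,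
      PySem.List.pySetD_natCast]
    have hkc : k + c < S.length := by omega
    refine ⟨by rw [List.length_set, ihlen], ?_⟩
    intro d
    by_cases hdk : d = k + c
    · subst hdk
      rw [List.getD_eq_getElem?_getD, List.getElem?_set_self hkc]
      simp only [Option.getD_some]
      rw [PySem.List.pyGetD_natCast, ihget, if_neg (by omega : ¬ (c ≤ k + c ∧ k + c < k + c)), List.append_nil,
        if_pos (by omega : c ≤ k + c ∧ k + c < k + 1 + c)]
      simp only [PySem.List.pyGetD_natCast, pvGetM]
      rw [show k + c - c = k by omega]
    · rw [List.getD_eq_getElem?_getD, List.getElem?_set_ne (by omega : k + c ≠ d),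
        ← List.getD_eq_getElem?_getD, ihget]
      by_cases hcd : c ≤ d ∧ d < k + c
      · rw [if_pos hcd, if_pos (by omega : c ≤ d ∧ d < k + 1 + c)]
      · rw [if_neg hcd, if_neg (by omega : ¬ (c ≤ d ∧ d < k + 1 + c))]

-- pvBInner satisfies the scatter characterisation
theorem pvBInner_spec (mat : List (List Int)) (c : Nat) (bs : List (List Int))
    (h : mat.length + c ≤ bs.length) :
    (pvBInner mat (mat.length : Int) (c : Int) bs).length = bs.length ∧
    ∀ d : Nat,
      (pvBInner mat (mat.length : Int) (c : Int) bs).getD d []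
        = bs.getD d [] ++ (if c ≤ d ∧ d < mat.length + c then [pvGetM mat (d - c) c] else []) := by
  unfold pvBInner
  rw [PySem.List.pyRange_zero_natCast, List.foldl_map]
  exact pvB_inner mat c mat.length bs h

-- B's outer loop invariant
theorem pvB_outer (mat : List (List Int)) :
    ∀ q : Nat, q ≤ (PySem.List.pyGetD mat 0 []).length →
    ((List.range q).foldl
        (fun (bs : List (List Int)) (col : Nat) => pvBInner mat (mat.length : Int) (col : Int) bs)
        (List.replicate (mat.length + (PySem.List.pyGetD mat 0 []).length - 1) [])).length
      = mat.length + (PySem.List.pyGetD mat 0 []).length - 1 ∧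
    ∀ d : Nat,
      ((List.range q).foldl
        (fun (bs : List (List Int)) (col : Nat) => pvBInner mat (mat.length : Int) (col : Int) bs)
        (List.replicate (mat.length + (PySem.List.pyGetD mat 0 []).length - 1) [])).getD d []
      = (List.range q).filterMap
          (fun c => if c ≤ d ∧ d < mat.length + c then some (pvGetM mat (d - c) c) else none) := by
  set L := mat.length with hL
  set R := (PySem.List.pyGetD mat 0 []).length with hR
  intro q
  induction q with
  | zero =>
    intro _
    refine ⟨by simp, ?_⟩
    intro d
    simp only [List.range_zero, List.foldl_nil, List.filterMap_nil]
    rw [List.getD_eq_getElem?_getD, List.getElem?_replicate]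
    split <;> rfl
  | succ q ih =>
    intro hq
    obtain ⟨ihlen, ihget⟩ := ih (by omega)
    rw [List.range_succ, List.foldl_append]
    set S := ((List.range q).foldl
        (fun (bs : List (List Int)) (col : Nat) => pvBInner mat (L : Int) (col : Int) bs)
        (List.replicate (L + R - 1) ([] : List Int))) with hS
    simp only [List.foldl_cons, List.foldl_nil]
    obtain ⟨blen, bget⟩ := pvBInner_spec mat q S (by omega)
    refine ⟨by rw [blen, ihlen], ?_⟩
    intro d
    rw [bget d, ihget d, List.filterMap_append]
    simp only [List.filterMap_cons, List.filterMap_nil]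
    by_cases hcd : q ≤ d ∧ d < L + q
    · rw [if_pos hcd, if_pos hcd]
    · rw [if_neg hcd, if_neg hcd]

theorem pvA_eq (mat : List (List Int)) :
    ne_sw_diagonal mat
      = (List.range (mat.length + (PySem.List.pyGetD mat 0 []).length - 1)).map (pvDiag mat) := by
  by_cases h0 : mat = []
  · subst h0
    decide
  · have hL1 : 1 ≤ mat.length := by
      cases mat with
      | nil => exact absurd rfl h0
      | cons a l => simp
    unfold ne_sw_diagonal
    rw [show (mat.length : Int) + ((PySem.List.pyGetD mat 0 []).length : Int) - 1
          = ((mat.length + (PySem.List.pyGetD mat 0 []).length - 1 : Nat) : Int) by omega,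
      PySem.List.pyRange_zero_natCast, pvA_outer]

theorem pvB_eq (mat : List (List Int)) :
    ne_sw_diagonal_alt mat
      = (List.range (mat.length + (PySem.List.pyGetD mat 0 []).length - 1)).map (pvDiag mat) := by
  unfold ne_sw_diagonal_alt
  rw [show ((mat.length : Int) + ((PySem.List.pyGetD mat 0 []).length : Int) - 1).toNat
        = mat.length + (PySem.List.pyGetD mat 0 []).length - 1 by omega,
    PySem.List.pyRange_zero_natCast, List.foldl_map]
  obtain ⟨hlen, hget⟩ := pvB_outer mat (PySem.List.pyGetD mat 0 []).length (le_refl _)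
  refine List.ext_getElem (by simpa using hlen) ?_
  intro i h1 h2
  rw [← List.getD_eq_getElem _ ([] : List Int) h1, hget i,
    List.getElem_map, List.getElem_range]
  rfl

-- ===== VERDICT (by name: the statement is the Claim_ definition above) =====
theorem ne_sw_diagonal_spec : Claim_equal_ne_sw_diagonal := by
  intro mat _ _
  unfold Spec_ne_sw_diagonal
  rw [pvA_eq, pvB_eq]
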